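-- pv_equiv track=rewrite | github.com/CLewisMessina/wolfstitch | processing/clean.py | clean_data_content
-- ===== SOURCE A (Python) =====
-- def clean_data_content(text: str) -> str:
--     """
--     Clean structured data content (CSV, JSON, XML, etc.)
--
--     This provides minimal cleaning appropriate for structured data files
--     where formatting may be significant.
--
--     Args:
--         text (str): Raw data content
--
--     Returns:
--         str: Lightly cleaned data content
--     """
--     if not text:
--         return text
--
--     # For data files, do very minimal cleaning to preserve structure
--     lines = text.split('\n')
--
--     # Only remove trailing whitespace from lines (preserve everything else)
--     cleaned_lines = [line.rstrip() for line in lines]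
--
--     # Remove excessive blank lines but be more permissive than code
--     result = []
--     blank_count = 0
--
--     for line in cleaned_lines:
--         if line == '':
--             blank_count += 1
--             if blank_count <= 3:  # More permissive for data files
--                 result.append(line)
--         else:
--             blank_count = 0
--             result.append(line)
--
--     cleaned_text = '\n'.join(result)
--     return cleaned_text.strip()
-- ===== SOURCE B (Python) =====
-- def clean_data_content(text: str) -> str:
--     """Run-based re-implementation: scan runs of blank/non-blank lines,
--     keep at most 3 lines of each blank run, instead of a running counter."""
--     if not text:
--         return text
--
--     cleaned = [line.rstrip() for line in text.split('\n')]
--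
--     result = []
--     n = len(cleaned)
--     i = 0
--     while i < n:
--         j = i
--         if cleaned[i]:
--             while j < n and cleaned[j]:
--                 j += 1
--             result.extend(cleaned[i:j])
--         else:
--             while j < n and not cleaned[j]:
--                 j += 1
--             result.extend(cleaned[i:min(i + 3, j)])
--         i = j
--
--     return '\n'.join(result).strip()
-- ===== Notes on version B (the rewrite author's own statement) =====
-- stated objective: alternative
-- what changed: Replaces the per-line stateful blank_count loop with a run-based scan: the cleaned lines are traversed as maximal runs of blank / non-blank lines, a blank run contributes its first min(len,3) lines and a non-blank run all of them.
import Mathlib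
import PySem

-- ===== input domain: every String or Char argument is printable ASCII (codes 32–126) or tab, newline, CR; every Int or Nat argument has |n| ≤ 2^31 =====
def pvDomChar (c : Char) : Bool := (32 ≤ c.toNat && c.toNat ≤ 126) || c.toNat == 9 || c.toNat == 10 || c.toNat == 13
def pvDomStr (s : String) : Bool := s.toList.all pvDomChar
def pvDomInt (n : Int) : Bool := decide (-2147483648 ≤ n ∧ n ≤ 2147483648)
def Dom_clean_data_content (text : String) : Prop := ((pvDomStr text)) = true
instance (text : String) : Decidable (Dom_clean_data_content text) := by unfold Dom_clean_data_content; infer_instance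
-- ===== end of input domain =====

-- B replaces A's stateful blank_count loop by a run-based scan (maximal blank/non-blank
-- runs; a blank run contributes its first min(len,3) lines) — objective: alternative.

-- ===== PORT A =====
-- literal transliteration of A (strings handled as lists of code points via PySem.Chars)
def clean_data_content (text : String) : String :=
  if text.toList.isEmpty then text
  else
    let lines := PySem.Chars.splitOn text.toList ['\n']
    let cleaned_lines := lines.map PySem.Chars.rstrip
    let st := cleaned_lines.foldl
      (fun (st : Nat × List (List Char)) line =>
        if line.isEmpty then
          if st.1 + 1 ≤ 3 then (st.1 + 1, st.2 ++ [line]) else (st.1 + 1, st.2)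
        else (0, st.2 ++ [line]))
      ((0 : Nat), ([] : List (List Char)))
    String.ofList (PySem.Chars.strip (PySem.Chars.join ['\n'] st.2))

-- ===== PORT B =====
-- B's while-loop scans the run starting at i with an index j and jumps i to j;
-- ported as takeWhile (the scanned run) / dropWhile (the remainder) — exact.
def pvRuns (lines : List (List Char)) : List (List Char) :=
  match lines with
  | [] => []
  | l :: ls =>
    if l.isEmpty then
      (l :: ls.takeWhile (fun x => x.isEmpty)).take 3
        ++ pvRuns (ls.dropWhile (fun x => x.isEmpty))
    else
      (l :: ls.takeWhile (fun x => !x.isEmpty))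
        ++ pvRuns (ls.dropWhile (fun x => !x.isEmpty))
termination_by lines.length
decreasing_by
  all_goals
    simpa using Nat.lt_succ_of_le (List.Sublist.length_le (List.dropWhile_sublist _))

def clean_data_content_alt (text : String) : String :=
  if text.toList.isEmpty then text
  else
    let cleaned := (PySem.Chars.splitOn text.toList ['\n']).map PySem.Chars.rstrip
    String.ofList (PySem.Chars.strip (PySem.Chars.join ['\n'] (pvRuns cleaned)))

-- ===== PRECONDITION & SPEC =====
def Spec_clean_data_content (text : String) (out : String) : Prop := out = clean_data_content_alt text
instance (text : String) (out : String) : Decidable (Spec_clean_data_content text out) := by unfold Spec_clean_data_content; infer_instance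

-- ===== CLAIM (what is proved, stated in full; the proofs are below) =====
def Claim_equal_clean_data_content : Prop := ∀ (text : String), Dom_clean_data_content text → Spec_clean_data_content text (clean_data_content text)

-- ===== LEMMAS AND PROOFS =====

-- A's loop, written as recursion on the line list with the running blank count
def pvLoopA : Nat → List (List Char) → List (List Char)
  | _, [] => []
  | bc, l :: ls =>
    if l.isEmpty then
      if bc + 1 ≤ 3 then l :: pvLoopA (bc + 1) ls else pvLoopA (bc + 1) ls
    else l :: pvLoopA 0 ls

lemma pvFoldl_eq_loopA (ls : List (List Char)) (bc : Nat) (acc : List (List Char)) :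
    (ls.foldl
      (fun (st : Nat × List (List Char)) line =>
        if line.isEmpty then
          if st.1 + 1 ≤ 3 then (st.1 + 1, st.2 ++ [line]) else (st.1 + 1, st.2)
        else (0, st.2 ++ [line]))
      (bc, acc)).2 = acc ++ pvLoopA bc ls := by
  induction ls generalizing bc acc with
  | nil => simp [pvLoopA]
  | cons l ls ih =>
    rw [List.foldl_cons]
    by_cases h1 : l.isEmpty
    · by_cases h2 : bc + 1 ≤ 3
      · simpa [h1, h2, pvLoopA] using ih (bc + 1) (acc ++ [l])
      · simpa [h1, h2, pvLoopA] using ih (bc + 1) acc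
    · simpa [h1, pvLoopA] using ih 0 (acc ++ [l])

lemma pvLoopA_blank (ls : List (List Char)) (bc : Nat) :
    pvLoopA bc ls = (ls.takeWhile (fun x => x.isEmpty)).take (3 - bc)
      ++ pvLoopA 0 (ls.dropWhile (fun x => x.isEmpty)) := by
  induction ls generalizing bc with
  | nil => simp [pvLoopA]
  | cons l ls ih =>
    by_cases h : l.isEmpty
    · rw [pvLoopA]
      by_cases h3 : bc + 1 ≤ 3
      · have h4 : 3 - bc = (3 - (bc + 1)) + 1 := by omega
        rw [ih (bc + 1), h4]
        simp [h, h3]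
      · have h4 : 3 - bc = 0 := by omega
        have h5 : 3 - (bc + 1) = 0 := by omega
        rw [ih (bc + 1), h4, h5]
        simp [h, h3]
    · rw [pvLoopA]
      simp only [h, Bool.false_eq_true, if_false, List.takeWhile_cons, List.dropWhile_cons]
      rw [pvLoopA]
      simp [h]

lemma pvLoopA_nonblank (ls : List (List Char)) :
    pvLoopA 0 ls = ls.takeWhile (fun x => !x.isEmpty)
      ++ pvLoopA 0 (ls.dropWhile (fun x => !x.isEmpty)) := by
  induction ls with
  | nil => simp [pvLoopA]
  | cons l ls ih =>
    by_cases h : l.isEmpty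
    · simp [h]
    · rw [pvLoopA]
      simp [h, ih]

lemma pvLoopA_eq_pvRuns (ls : List (List Char)) : pvLoopA 0 ls = pvRuns ls := by
  match ls with
  | [] => simp [pvLoopA, pvRuns]
  | l :: ls =>
    by_cases h : l.isEmpty
    · rw [pvRuns, pvLoopA_blank (l :: ls) 0]
      simp only [List.takeWhile_cons, List.dropWhile_cons]
      simp [h, pvLoopA_eq_pvRuns (ls.dropWhile (fun x => x.isEmpty))]
    · rw [pvRuns, pvLoopA_nonblank (l :: ls)]
      simp only [List.takeWhile_cons, List.dropWhile_cons]
      simp [h, pvLoopA_eq_pvRuns (ls.dropWhile (fun x => !x.isEmpty))]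
termination_by ls.length
decreasing_by
  all_goals
    simpa using Nat.lt_succ_of_le (List.Sublist.length_le (List.dropWhile_sublist _))

-- ===== VERDICT (by name: the statement is the Claim_ definition above) =====
theorem clean_data_content_spec : Claim_equal_clean_data_content := by
  intro text _
  unfold Spec_clean_data_content clean_data_content clean_data_content_alt
  by_cases h : text.toList.isEmpty
  · simp [h]
  · simp only [h, if_neg, Bool.false_eq_true, not_false_iff]
    rw [pvFoldl_eq_loopA, pvLoopA_eq_pvRuns]
    simp
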